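-- pv_equiv track=rewrite | github.com/ArmandMaree/DistrobutedSystemsPirateProject | src/cluesolver.py | useBucket
-- ===== SOURCE A (Python) =====
-- def useBucket(clue):
-- 	newClue = ""
--
-- 	for c in clue:
-- 		if c.isdigit():
-- 			c = int(c)
--
-- 			if c > 5:
-- 				c = c - 2
-- 			else:
-- 				c = c * 2
--
-- 			c = str(c)
--
-- 		newClue += c
--
-- 	clue = newClue.upper()
-- 	return clue
-- ===== SOURCE B (Python) =====
-- def useBucket(clue):
-- 	# Divide and conquer over index ranges: transform each half independently and
-- 	# concatenate; uppercasing is fused at the leaves (digits are unaffected by upper()).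
-- 	def go(lo, hi):
-- 		n = hi - lo
-- 		if n == 0:
-- 			return ""
-- 		if n == 1:
-- 			c = clue[lo]
-- 			if c.isdigit():
-- 				d = int(c)
-- 				return str(d - 2 if d > 5 else d * 2)
-- 			return c.upper()
-- 		mid = lo + n // 2
-- 		return go(lo, mid) + go(mid, hi)
-- 	return go(0, len(clue))
-- ===== Notes on version B (the rewrite author's own statement) =====
-- stated objective: alternative
-- what changed: Replaces A's left-to-right accumulation loop followed by a separate upper() pass with a divide-and-conquer recursion over index ranges that splits the string in half and fuses uppercasing into the single-character leaves (correct because concatenation is associative and upper() leaves digits unchanged).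
import Mathlib
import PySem

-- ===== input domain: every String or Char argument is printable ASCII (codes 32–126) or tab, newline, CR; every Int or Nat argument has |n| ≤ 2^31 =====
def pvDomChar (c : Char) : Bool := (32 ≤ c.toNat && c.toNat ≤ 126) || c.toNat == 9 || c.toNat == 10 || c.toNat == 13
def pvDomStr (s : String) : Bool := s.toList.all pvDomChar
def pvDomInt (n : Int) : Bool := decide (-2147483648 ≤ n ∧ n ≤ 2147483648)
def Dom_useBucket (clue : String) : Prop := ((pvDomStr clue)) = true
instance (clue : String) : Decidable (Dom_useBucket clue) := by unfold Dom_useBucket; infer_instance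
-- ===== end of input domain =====

-- B replaces A's left-to-right accumulation pass (build newClue, then upper() it) by a
-- divide-and-conquer recursion over index ranges with uppercasing fused at the leaves (alternative decomposition).

-- ===== PORT A =====
-- loop body of A: if c.isdigit(): c = int(c); c = c-2 if c>5 else c*2; c = str(c)
def pvStepA (c : Char) : List Char :=
  if PySem.Chars.isdigit c then
    -- int(c): the branch guarantees [c] is a digit, so ofChars? is some; getD 0 is unreachable
    let n : Int := (PySem.Int.ofChars? [c]).getD 0
    PySem.Int.toChars (if n > 5 then n - 2 else n * 2)
  else [c]

def useBucket (clue : String) : String :=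
  -- newClue = ""; for c in clue: … newClue += c; return newClue.upper()
  let newClue := clue.toList.foldl (fun acc c => acc ++ pvStepA c) []
  String.ofList (PySem.Chars.upper newClue)

-- ===== PORT B =====
-- def go(lo, hi): … recursion splitting the index range [lo, hi) in half
def pvGo (l : List Char) (lo hi : Nat) : List Char :=
  let n := hi - lo
  if n = 0 then []
  else if n = 1 then
    -- c = clue[lo]: go is only called with lo < hi ≤ len(clue), so the index is in range
    let c := ((PySem.List.pyGet? l (lo : Int)).getD ' ')
    if PySem.Chars.isdigit c then
      let d : Int := (PySem.Int.ofChars? [c]).getD 0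
      PySem.Int.toChars (if d > 5 then d - 2 else d * 2)
    else PySem.Chars.upper [c]
  else
    let mid := lo + n / 2
    pvGo l lo mid ++ pvGo l mid hi
termination_by hi - lo
decreasing_by all_goals omega

def useBucket_alt (clue : String) : String :=
  -- return go(0, len(clue))
  String.ofList (pvGo clue.toList 0 clue.toList.length)

-- ===== PRECONDITION & SPEC =====
def Spec_useBucket (clue : String) (out : String) : Prop := out = useBucket_alt clue
instance (clue : String) (out : String) : Decidable (Spec_useBucket clue out) := by unfold Spec_useBucket; infer_instance

-- ===== CLAIM (what is proved, stated in full; the proofs are below) =====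
def Claim_equal_useBucket : Prop := ∀ (clue : String), Dom_useBucket clue → Spec_useBucket clue (useBucket clue)

-- ===== LEMMAS AND PROOFS =====

-- B's leaf value, as a function of the character
def pvLeaf (c : Char) : List Char :=
  if PySem.Chars.isdigit c then
    PySem.Int.toChars (if ((PySem.Int.ofChars? [c]).getD 0 : Int) > 5
                       then (PySem.Int.ofChars? [c]).getD 0 - 2
                       else (PySem.Int.ofChars? [c]).getD 0 * 2)
  else PySem.Chars.upper [c]

-- the leaf of B is exactly 'upper of A's loop body' on every domain character
theorem pvLeaf_eq (c : Char) (hdom : pvDomChar c = true) :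
    pvLeaf c = PySem.Chars.upper (pvStepA c) := by
  have hb : 9 ≤ c.toNat ∧ c.toNat ≤ 126 := by
    simp [pvDomChar] at hdom; omega
  obtain ⟨h1, h2⟩ := hb
  interval_cases hc : c.toNat <;>
    · have hce : c = _ := (Char.ofNat_toNat c).symm.trans (by rw [hc])
      subst hce
      revert hdom
      decide

-- pvGo on a range equals the flatMap of pvLeaf over that segment of the list
theorem pvGo_eq (l : List Char) :
    ∀ n lo hi, hi - lo = n → hi ≤ l.length →
      pvGo l lo hi = ((l.drop lo).take (hi - lo)).flatMap pvLeaf := by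
  intro n
  induction n using Nat.strong_induction_on with
  | _ n ih =>
    intro lo hi hn hlen
    subst hn
    rw [pvGo]
    by_cases h0 : hi - lo = 0
    · simp [h0]
    by_cases h1 : hi - lo = 1
    · have hlo : lo < l.length := by omega
      have hseg : (l.drop lo).take (hi - lo) = [l[lo]] := by
        rw [h1]
        rw [List.take_one, List.head?_drop]
        simp [List.getElem?_eq_getElem hlo]
      rw [h1] at hseg
      simp only [h1, hseg]
      simp [pvLeaf, List.getElem?_eq_getElem hlo]
    · simp only [h0, if_false, h1]
      set mid := lo + (hi - lo) / 2 with hmid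
      have hm1 : lo < mid := by omega
      have hm2 : mid < hi := by omega
      rw [ih (mid - lo) (by omega) lo mid rfl (by omega),
          ih (hi - mid) (by omega) mid hi rfl hlen]
      have e : hi - lo = (mid - lo) + (hi - mid) := by omega
      rw [e, List.take_add, List.drop_drop, ← List.flatMap_append]
      have e2 : lo + (mid - lo) = mid := by omega
      rw [e2]

-- upper distributes over the flatMap of A's loop body (upper maps characters pointwise)
theorem pvUpper_flatMap (l : List Char) (hdom : l.all pvDomChar = true) :
    PySem.Chars.upper (l.flatMap pvStepA) = l.flatMap pvLeaf := by
  induction l with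
  | nil => rfl
  | cons c l ih =>
    simp only [List.all_cons, Bool.and_eq_true] at hdom
    simp only [List.flatMap_cons, PySem.Chars.upper, List.map_append] at *
    rw [ih hdom.2]
    rw [pvLeaf_eq c hdom.1]
    rfl

-- ===== VERDICT (by name: the statement is the Claim_ definition above) =====
theorem useBucket_spec : Claim_equal_useBucket := by
  intro clue hdom
  unfold Spec_useBucket useBucket useBucket_alt
  rw [PySem.List.foldl_append_eq_flatMap]
  show String.ofList (PySem.Chars.upper ([] ++ clue.toList.flatMap pvStepA))
      = String.ofList (pvGo clue.toList 0 clue.toList.length)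
  rw [List.nil_append, pvUpper_flatMap clue.toList hdom,
      pvGo_eq clue.toList clue.toList.length 0 clue.toList.length rfl (le_refl _)]
  rw [List.drop_zero, Nat.sub_zero, List.take_length]
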